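-- pv_equiv track=rewrite | github.com/thomasn1003/project1-cpsc335 | algorithm1/main.py | connecting_pairs_of_pers
-- ===== SOURCE A (Python) =====
-- def connecting_pairs_of_pers(row):
--     swaps = 0
--     n = len(row)  # Length of the row list
--
--     # Loop through the row with a step of 2
--     for i in range(0, n, 2):
--         if row[i] % 2 == 0:  # If the person is even
--             # Check if the person is not seated with their correct partner
--             if i + 1 < n and row[i + 1] != row[i] + 1:
--                 swaps += 1
--                 # Find the correct partner and swap
--                 for j in range(i + 2, n):
--                     if row[j] == row[i] + 1:
--                         row[i + 1], row[j] = row[j], row[i + 1]  # Swap them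
--                         break
--
--         else:  # If the person is odd
--             # Check if the person is not seated with their correct partner
--             if i + 1 < n and row[i + 1] != row[i] - 1:
--                 swaps += 1
--                 # Find the correct partner and swap
--                 for j in range(i + 2, n):
--                     if row[j] == row[i] - 1:
--                         row[i + 1], row[j] = row[j], row[i + 1]  # Swap them
--                         break
--
--     return swaps  # Return the number of swaps made
-- ===== SOURCE B (Python) =====
-- def connecting_pairs_of_pers(row):
--     # Return-value equivalent to A.  A mutates `row` in place; B works on a
--     # copy and leaves the argument untouched (equivalence is about the result).
--     swaps = 0
--     xs = list(row)
--     while len(xs) >= 2: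
--         a, b = xs[0], xs[1]
--         p = a + 1 if a % 2 == 0 else a - 1
--         rest = xs[2:]
--         if b != p:
--             swaps += 1
--             if p in rest:
--                 rest[rest.index(p)] = b
--         xs = rest
--     return swaps
-- ===== Notes on version B (the rewrite author's own statement) =====
-- stated objective: simpler
-- what changed: Replaces A's index-based double loop with in-place two-cell swaps on the full array by a single pass over a shrinking suffix list that just overwrites the partner's slot with the displaced neighbour (the seated pair is dropped, never written back); B does not mutate its argument, and its per-pair scan runs through C-level slice/'in'/index operations instead of A's interpreted inner loop.
import Mathlib
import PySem

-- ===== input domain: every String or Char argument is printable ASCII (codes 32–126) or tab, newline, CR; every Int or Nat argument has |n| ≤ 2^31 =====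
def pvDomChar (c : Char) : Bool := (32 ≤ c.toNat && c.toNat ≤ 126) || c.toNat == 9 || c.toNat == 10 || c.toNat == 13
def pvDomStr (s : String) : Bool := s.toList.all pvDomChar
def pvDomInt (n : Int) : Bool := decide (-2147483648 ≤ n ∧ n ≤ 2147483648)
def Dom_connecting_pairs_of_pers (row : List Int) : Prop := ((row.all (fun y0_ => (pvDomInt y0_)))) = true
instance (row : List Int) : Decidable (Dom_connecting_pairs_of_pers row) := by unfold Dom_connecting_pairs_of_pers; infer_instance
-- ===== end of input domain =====

-- B is a return-value-equivalent restructuring of A: A mutates its argument in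
-- place with indexed two-cell swaps; B consumes a copy pair by pair and only
-- overwrites the partner's slot (objective: simpler).  Equivalence is about the
-- RETURN value only (A's in-place mutation of `row` is not reproduced by B).

-- ===== PORT A =====
-- inner `for j in range(i+2, n): if row[j] == target: … break` — find the break index
def aFind (row : List Int) (target : Int) (j : Nat) : Option Nat :=
  if _h : j < row.length then
    if row.getD j 0 = target then some j else aFind row target (j + 1)
  else none
termination_by row.length - j

-- the `row[i+1], row[j] = row[j], row[i+1]` swap performed at the break index (if any)
def aSwap (row : List Int) (i : Nat) (target : Int) : List Int :=
  match aFind row target (i + 2) with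
  | some j => (row.set (i + 1) (row.getD j 0)).set j (row.getD (i + 1) 0)
  | none => row

theorem aSwap_length (row : List Int) (i : Nat) (target : Int) :
    (aSwap row i target).length = row.length := by
  unfold aSwap; cases aFind row target (i + 2) <;> simp

def aLoop (row : List Int) (swaps : Int) (i : Nat) : Int :=
  if _h : i < row.length then
    if row.getD i 0 % 2 = 0 then
      if i + 1 < row.length ∧ row.getD (i + 1) 0 ≠ row.getD i 0 + 1 then
        aLoop (aSwap row i (row.getD i 0 + 1)) (swaps + 1) (i + 2)
      else aLoop row swaps (i + 2)
    else
      if i + 1 < row.length ∧ row.getD (i + 1) 0 ≠ row.getD i 0 - 1 then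
        aLoop (aSwap row i (row.getD i 0 - 1)) (swaps + 1) (i + 2)
      else aLoop row swaps (i + 2)
  else swaps
termination_by row.length - i
decreasing_by all_goals (try rw [aSwap_length]); all_goals omega

def connecting_pairs_of_pers (row : List Int) : Int := aLoop row 0 0

-- ===== PORT B =====
-- `if p in rest: rest[rest.index(p)] = b`
def bReplace (rest : List Int) (p b : Int) : List Int :=
  match PySem.List.index? rest p with
  | some k => rest.set k b
  | none => rest

theorem bReplace_length (rest : List Int) (p b : Int) :
    (bReplace rest p b).length = rest.length := by
  unfold bReplace; cases PySem.List.index? rest p <;> simp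

def bLoop (xs : List Int) (swaps : Int) : Int :=
  match xs with
  | a :: b :: rest =>
    let p := if a % 2 = 0 then a + 1 else a - 1
    if b ≠ p then bLoop (bReplace rest p b) (swaps + 1)
    else bLoop rest swaps
  | _ => swaps
termination_by xs.length
decreasing_by all_goals simp [bReplace_length]

def connecting_pairs_of_pers_alt (row : List Int) : Int := bLoop row 0

-- ===== PRECONDITION & SPEC =====
def Spec_connecting_pairs_of_pers (row : List Int) (out : Int) : Prop := out = connecting_pairs_of_pers_alt row
instance (row : List Int) (out : Int) : Decidable (Spec_connecting_pairs_of_pers row out) := by unfold Spec_connecting_pairs_of_pers; infer_instance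

-- ===== CLAIM (what is proved, stated in full; the proofs are below) =====
def Claim_equal_connecting_pairs_of_pers : Prop := ∀ (row : List Int), Dom_connecting_pairs_of_pers row → Spec_connecting_pairs_of_pers row (connecting_pairs_of_pers row)

-- ===== LEMMAS AND PROOFS =====

theorem aFind_eq (d : Nat) : ∀ (row : List Int) (t : Int) (j : Nat), row.length ≤ j + d →
    aFind row t j = (PySem.List.index? (row.drop j) t).map (· + j) := by
  induction d with
  | zero =>
    intro row t j hd
    rw [aFind, dif_neg (by omega)]
    rw [List.drop_of_length_le (by omega)]
    simp [PySem.List.index?_eq_idxOf?]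
  | succ d ih =>
    intro row t j hd
    rw [aFind]
    by_cases h : j < row.length
    · rw [dif_pos h]
      have hdrop : row.drop j = row[j] :: row.drop (j + 1) := List.drop_eq_getElem_cons h
      have hgd : row.getD j 0 = row[j] := List.getD_eq_getElem row 0 h
      by_cases ht : row.getD j 0 = t
      · rw [if_pos ht, hdrop]
        have : row[j] = t := by rw [← hgd, ht]
        rw [this, PySem.List.index?_cons_self]
        simp
      · rw [if_neg ht, hdrop]
        rw [PySem.List.index?_cons_of_ne (row.drop (j + 1)) (by rw [← hgd]; exact ht)]
        rw [ih row t (j + 1) (by omega)]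
        cases hq : PySem.List.index? (row.drop (j + 1)) t with
        | none => simp
        | some k => simp; omega
    · rw [dif_neg h]
      rw [List.drop_of_length_le (by omega)]
      simp [PySem.List.index?_eq_idxOf?]

theorem drop_aSwap (row : List Int) (i : Nat) (p : Int) :
    (aSwap row i p).drop (i + 2) = bReplace (row.drop (i + 2)) p (row.getD (i + 1) 0) := by
  unfold aSwap bReplace
  rw [aFind_eq (row.length) row p (i + 2) (by omega)]
  cases h : PySem.List.index? (row.drop (i + 2)) p with
  | none => simp
  | some k =>
    simp only [Option.map_some]
    rw [List.drop_set, if_neg (by omega), List.drop_set, if_pos (by omega)]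
    congr 1
    omega

theorem bLoop_nil (s : Int) : bLoop [] s = s := by
  rw [bLoop]
  all_goals intro a b rest h; simp at h

theorem bLoop_single (a : Int) (s : Int) : bLoop [a] s = s := by
  rw [bLoop]
  all_goals intro x y rest h; simp at h

theorem main_eq (d : Nat) : ∀ (row : List Int) (i : Nat) (s : Int), row.length ≤ i + d →
    aLoop row s i = bLoop (row.drop i) s := by
  induction d with
  | zero =>
    intro row i s hd
    rw [aLoop, dif_neg (by omega), List.drop_of_length_le (by omega), bLoop_nil]
  | succ d ih =>
    intro row i s hd
    by_cases h : i < row.length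
    · have hgd : row.getD i 0 = row[i] := List.getD_eq_getElem row 0 h
      have hdrop1 : row.drop i = row[i] :: row.drop (i + 1) := List.drop_eq_getElem_cons h
      by_cases h1 : i + 1 < row.length
      · have hgd1 : row.getD (i + 1) 0 = row[i + 1] := List.getD_eq_getElem row 0 h1
        have hdrop2 : row.drop (i + 1) = row[i + 1] :: row.drop (i + 2) :=
          List.drop_eq_getElem_cons h1
        rw [aLoop, dif_pos h, hdrop1, hdrop2, bLoop]
        simp only [hgd, hgd1]
        by_cases hpar : row[i] % 2 = 0
        · simp only [if_pos hpar]
          by_cases hb : row[i + 1] = row[i] + 1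
          · rw [if_neg (by simp [hb]), if_neg (by simp [hb])]
            exact ih row (i + 2) s (by omega)
          · rw [if_pos ⟨h1, by simpa [hgd1] using hb⟩, if_pos (by simpa using hb)]
            rw [ih (aSwap row i (row[i] + 1)) (i + 2) (s + 1) (by rw [aSwap_length]; omega)]
            rw [drop_aSwap, hgd1]
        · simp only [if_neg hpar]
          by_cases hb : row[i + 1] = row[i] - 1
          · rw [if_neg (by simp [hb]), if_neg (by simp [hb])]
            exact ih row (i + 2) s (by omega)
          · rw [if_pos ⟨h1, by simpa [hgd1] using hb⟩, if_pos (by simpa using hb)]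
            rw [ih (aSwap row i (row[i] - 1)) (i + 2) (s + 1) (by rw [aSwap_length]; omega)]
            rw [drop_aSwap, hgd1]
      · have hlen : row.length = i + 1 := by omega
        have hdrop2 : row.drop (i + 1) = [] := List.drop_of_length_le (by omega)
        rw [aLoop, dif_pos h, hdrop1, hdrop2, bLoop_single]
        have hA : aLoop row s (i + 2) = s := by
          rw [ih row (i + 2) s (by omega), List.drop_of_length_le (by omega), bLoop_nil]
        by_cases hpar : row.getD i 0 % 2 = 0
        · rw [if_pos hpar, if_neg (fun hc => absurd hc.1 h1), hA]
        · rw [if_neg hpar, if_neg (fun hc => absurd hc.1 h1), hA]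
    · rw [aLoop, dif_neg h, List.drop_of_length_le (by omega), bLoop_nil]

-- ===== VERDICT (by name: the statement is the Claim_ definition above) =====
theorem connecting_pairs_of_pers_spec : Claim_equal_connecting_pairs_of_pers := by
  intro row _
  unfold Spec_connecting_pairs_of_pers connecting_pairs_of_pers connecting_pairs_of_pers_alt
  simpa using main_eq row.length row 0 0 (by omega)
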